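-- pv_equiv track=rewrite | github.com/jamesaclark1995/jamesaclark1995 | days_in_month.py | days_in_month
-- ===== SOURCE A (Python) =====
-- def is_year_leap(year):
--     if year % 4 == 0 and year % 100 != 0:
--         return True
--     elif year % 4 == 0 and year % 100 == 0 and year % 400 == 0:
--         return True
--     else:
--         return False
--
-- def days_in_month(year, month):
--     months = [31, 28, 31, 30, 31, 30, 31, 31, 30, 31, 30, 31]
--     # Number of days in each month
--
--     if is_year_leap(year) is True:
--         months[1] = 29 # Taking leap years into account
--
--     for i in months:
--         if 1 <= month <= 12:
--             return months[month - 1]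
--         else:
--             return None
-- ===== SOURCE B (Python) =====
-- def days_in_month(year, month):
--     if not 1 <= month <= 12:
--         return None
--     if month == 2:
--         return 29 if (year % 4 == 0 and (year % 100 != 0 or year % 400 == 0)) else 28
--     return 31 - (month - 1) % 7 % 2
-- ===== Notes on version B (the rewrite author's own statement) =====
-- stated objective: simpler
-- what changed: Replaces the 12-element table (with in-place leap mutation and a redundant for-loop that only ever runs its first iteration) by a closed-form arithmetic expression 31 - (month-1) % 7 % 2, with February handled by a one-line leap test.
import Mathlib
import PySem

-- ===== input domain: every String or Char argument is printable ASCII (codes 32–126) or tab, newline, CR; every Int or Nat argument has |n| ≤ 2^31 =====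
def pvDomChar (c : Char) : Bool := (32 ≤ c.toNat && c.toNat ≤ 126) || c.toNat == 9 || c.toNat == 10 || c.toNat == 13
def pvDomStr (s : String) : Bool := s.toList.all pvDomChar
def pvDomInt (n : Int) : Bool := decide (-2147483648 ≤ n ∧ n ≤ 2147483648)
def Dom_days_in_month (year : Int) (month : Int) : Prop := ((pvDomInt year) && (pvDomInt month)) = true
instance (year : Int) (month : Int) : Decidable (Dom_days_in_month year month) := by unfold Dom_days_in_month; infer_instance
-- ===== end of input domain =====

-- B: closed-form arithmetic (31 - (month-1)%7%2) instead of A's table build + lookup; simpler, same values.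
-- ===== PORT A =====
def is_year_leap (year : Int) : Bool :=
  if PySem.Int.mod year 4 = 0 ∧ PySem.Int.mod year 100 ≠ 0 then true
  else if PySem.Int.mod year 4 = 0 ∧ PySem.Int.mod year 100 = 0 ∧ PySem.Int.mod year 400 = 0 then true
  else false

def days_in_month (year : Int) (month : Int) : Option Int :=
  let months : List Int := [31, 28, 31, 30, 31, 30, 31, 31, 30, 31, 30, 31]
  let months := if is_year_leap year = true then months.set 1 29 else months
  -- 'for i in months: …' returns on its first iteration; months is nonempty, so the body runs once
  match months with
  | [] => none
  | _ :: _ =>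
    if 1 ≤ month ∧ month ≤ 12 then PySem.List.pyGet? months (month - 1) else none

-- ===== PORT B =====
def days_in_month_alt (year : Int) (month : Int) : Option Int :=
  if ¬ (1 ≤ month ∧ month ≤ 12) then none
  else if month = 2 then
    if PySem.Int.mod year 4 = 0 ∧ (PySem.Int.mod year 100 ≠ 0 ∨ PySem.Int.mod year 400 = 0)
    then some 29 else some 28
  else some (31 - PySem.Int.mod (PySem.Int.mod (month - 1) 7) 2)

-- ===== PRECONDITION & SPEC =====
def Spec_days_in_month (year : Int) (month : Int) (out : Option Int) : Prop := out = days_in_month_alt year month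
instance (year : Int) (month : Int) (out : Option Int) : Decidable (Spec_days_in_month year month out) := by unfold Spec_days_in_month; infer_instance

-- ===== CLAIM (what is proved, stated in full; the proofs are below) =====
def Claim_equal_days_in_month : Prop := ∀ (year : Int) (month : Int), Dom_days_in_month year month → Spec_days_in_month year month (days_in_month year month)

-- ===== LEMMAS AND PROOFS =====

-- ===== VERDICT (by name: the statement is the Claim_ definition above) =====
theorem leap_eq (year : Int) :
    (is_year_leap year = true) ↔
    (PySem.Int.mod year 4 = 0 ∧ (PySem.Int.mod year 100 ≠ 0 ∨ PySem.Int.mod year 400 = 0)) := by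
  unfold is_year_leap
  split_ifs with a b
  · exact iff_of_true rfl (by tauto)
  · exact iff_of_true rfl (by tauto)
  · exact iff_of_false (by simp) (by tauto)

theorem days_in_month_spec : Claim_equal_days_in_month := by
  intro year month _
  unfold Spec_days_in_month days_in_month days_in_month_alt
  by_cases hm : 1 ≤ month ∧ month ≤ 12
  · by_cases hl : is_year_leap year = true
    · have hl' := (leap_eq year).mp hl
      obtain ⟨h1, h2⟩ := hm
      interval_cases month <;>
        norm_num [hl, hl', PySem.List.pyGet?, PySem.List.pyIdx?, PySem.Int.mod] <;> first | decide | (simp only [PySem.Int.mod] at hl'; tauto)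
    · have hl' : ¬ (PySem.Int.mod year 4 = 0 ∧ (PySem.Int.mod year 100 ≠ 0 ∨ PySem.Int.mod year 400 = 0)) :=
        fun h => hl ((leap_eq year).mpr h)
      obtain ⟨h1, h2⟩ := hm
      interval_cases month <;>
        norm_num [hl, hl', PySem.List.pyGet?, PySem.List.pyIdx?, PySem.Int.mod] <;> first | decide | (simp only [PySem.Int.mod] at hl'; tauto)
  · by_cases hl : is_year_leap year = true <;> simp [hl, hm]
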